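-- pv_equiv track=rewrite | github.com/mahmoudparsian/data-algorithms-with-spark | code/chap10/python/structured_to_hierarchical_to_xml_rdd.py | create_xml
-- ===== SOURCE A (Python) =====
-- def create_xml(element):
--     #
--     post_id = element[0]
--     iterables = element[1]
--     FIRST_TIME = True
--     #
--     xml_string = "<post id=\"" + post_id + "\">"
--     for t2 in iterables:
--         title, creator = t2[0]
--         comment, commented_by = t2[1]
--         if (FIRST_TIME):
--             xml_string += "<title>" + title + "</title>"
--             xml_string += "<creator>" + creator + "</creator>"
--             FIRST_TIME = False
--         #end-if
--         xml_string += "<comment>" + comment + "</comment>"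
--     #end-for
--     xml_string += "</post>"
--
--     #end-for
--     return xml_string
-- ===== SOURCE B (Python) =====
-- def create_xml(element):
--     post_id, iterables = element
--
--     def tag(name, body):
--         return "<" + name + ">" + body + "</" + name + ">"
--
--     def rest_xml(items):
--         # the tail of the document: the comment tags of this suffix, then the
--         # closing tag, assembled by structural recursion on the list
--         if not items:
--             return "</post>"
--         (_, (comment, _)) = items[0]
--         return tag("comment", comment) + rest_xml(items[1:])
--
--     items = list(iterables)
--     head = "<post id=\"" + post_id + "\">"
--     if items:
--         (title, creator), _ = items[0]
--         head += tag("title", title) + tag("creator", creator)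
--     return head + rest_xml(items)
-- ===== Notes on version B (the rewrite author's own statement) =====
-- stated objective: alternative
-- what changed: B replaces A's imperative FIRST_TIME-flag accumulator loop by a recursive decomposition: a generic tag() helper, the title/creator block emitted once from the head of the list, and the rest of the document (comment tags plus the closing </post>) built back-to-front by structural recursion on the list.
import Mathlib
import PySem

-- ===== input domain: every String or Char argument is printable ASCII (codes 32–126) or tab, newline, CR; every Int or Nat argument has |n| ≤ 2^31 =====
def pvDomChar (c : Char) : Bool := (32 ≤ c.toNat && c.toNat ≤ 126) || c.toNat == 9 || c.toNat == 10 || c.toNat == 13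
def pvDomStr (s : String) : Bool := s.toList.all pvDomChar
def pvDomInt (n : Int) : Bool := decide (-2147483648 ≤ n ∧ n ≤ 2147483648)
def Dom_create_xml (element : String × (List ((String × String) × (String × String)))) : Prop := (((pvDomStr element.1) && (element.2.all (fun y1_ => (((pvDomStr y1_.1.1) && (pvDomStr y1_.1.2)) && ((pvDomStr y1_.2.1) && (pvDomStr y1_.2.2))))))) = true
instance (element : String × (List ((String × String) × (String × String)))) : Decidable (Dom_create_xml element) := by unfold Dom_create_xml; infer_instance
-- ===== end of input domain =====

-- B replaces A's FIRST_TIME-flag accumulator loop by a recursive decomposition (tag helper,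
-- head-emitted title/creator, back-to-front recursion for comments + closing tag); equal return values proved.

-- ===== PORT A =====
-- A's for-loop over iterables, carrying (xml_string, FIRST_TIME) exactly as the Python does
def create_xml_loop (state : String × Bool) :
    List ((String × String) × (String × String)) → String × Bool
  | [] => state
  | t2 :: rest =>
      let title := t2.1.1
      let creator := t2.1.2
      let comment := t2.2.1
      let s1 :=
        if state.2 then
          state.1 ++ ("<title>" ++ title ++ "</title>") ++ ("<creator>" ++ creator ++ "</creator>")
        else state.1
      create_xml_loop (s1 ++ ("<comment>" ++ comment ++ "</comment>"), if state.2 then false else state.2) rest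

def create_xml (element : String × (List ((String × String) × (String × String)))) : String :=
  let post_id := element.1
  let iterables := element.2
  let xml_string := "<post id=\"" ++ post_id ++ "\">"
  (create_xml_loop (xml_string, true) iterables).1 ++ "</post>"

-- ===== PORT B =====
-- Source B's tag helper
def cx_tag (name body : String) : String :=
  "<" ++ name ++ ">" ++ body ++ "</" ++ name ++ ">"

-- Source B's rest_xml: structural recursion building the comment tags and the closing tag
def cx_rest_xml : List ((String × String) × (String × String)) → String
  | [] => "</post>"
  | t2 :: rest => cx_tag "comment" t2.2.1 ++ cx_rest_xml rest

def create_xml_alt (element : String × (List ((String × String) × (String × String)))) : String :=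
  let post_id := element.1
  let items := element.2
  let head0 := "<post id=\"" ++ post_id ++ "\">"
  let head :=
    match items with
    | [] => head0
    | t2 :: _ => head0 ++ cx_tag "title" t2.1.1 ++ cx_tag "creator" t2.1.2
  head ++ cx_rest_xml items

-- ===== PRECONDITION & SPEC =====
def Spec_create_xml (element : String × (List ((String × String) × (String × String)))) (out : String) : Prop := out = create_xml_alt element
instance (element : String × (List ((String × String) × (String × String)))) (out : String) : Decidable (Spec_create_xml element out) := by unfold Spec_create_xml; infer_instance

-- ===== CLAIM (what is proved, stated in full; the proofs are below) =====
def Claim_equal_create_xml : Prop := ∀ (element : String × (List ((String × String) × (String × String)))), Dom_create_xml element → Spec_create_xml element (create_xml element)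

-- ===== LEMMAS AND PROOFS =====

theorem cx_tag_comment (c : String) :
    cx_tag "comment" c = "<comment>" ++ c ++ "</comment>" := by
  simp [cx_tag, show ("<" : String) ++ "comment" ++ ">" = "<comment>" from by decide,
    String.append_assoc]

-- once the flag is false, the loop builds exactly the tail B's rest_xml builds
theorem create_xml_loop_false (s : String)
    (l : List ((String × String) × (String × String))) :
    (create_xml_loop (s, false) l).1 ++ "</post>" = s ++ cx_rest_xml l := by
  induction l generalizing s with
  | nil => simp [create_xml_loop, cx_rest_xml]
  | cons h t ih =>
      simp [create_xml_loop, cx_rest_xml, ih, cx_tag_comment, String.append_assoc]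

-- ===== VERDICT (by name: the statement is the Claim_ definition above) =====
theorem create_xml_spec : Claim_equal_create_xml := by
  intro ⟨pid, items⟩ _
  show create_xml (pid, items) = create_xml_alt (pid, items)
  cases items with
  | nil => simp [create_xml, create_xml_alt, create_xml_loop, cx_rest_xml]
  | cons h t =>
      simp [create_xml, create_xml_alt, create_xml_loop, create_xml_loop_false,
        cx_rest_xml, cx_tag, String.append_assoc]
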